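-- pv_equiv track=rewrite | github.com/Narmadha98/jerry | circular.py | CircularPath
-- ===== SOURCE A (Python) =====
-- n=0
--
-- def CircularPath(s):
--     x=0
--     y=0
--     d=n
--     for i in range(len(s)):
--         move=s[i]
--         if move=='R':
--             d=(d+1)%4
--         elif move=='L':
--             d=(d+3)%4
--         else:
--             if d==0:
--                 y=y+1
--             elif d==2:
--                 y=y-1
--             elif d==1:
--                 x=x+1
--             elif d==3:
--                 x=x-1
--     return x,y
-- ===== SOURCE B (Python) =====
-- def CircularPath(s):
--     # pass 1: net turn count (mod 4) in effect before each character
--     headings = []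
--     t = 0
--     for move in s:
--         headings.append(t % 4)
--         if move == 'R':
--             t += 1
--         elif move == 'L':
--             t -= 1
--     # pass 2: keep the headings of the forward steps, combine their counts
--     steps = [h for move, h in zip(s, headings) if move != 'R' and move != 'L']
--     return steps.count(1) - steps.count(3), steps.count(0) - steps.count(2)
-- ===== Notes on version B (the rewrite author's own statement) =====
-- stated objective: alternative
-- what changed: B replaces A's single simulation loop (position+direction state with a 4-way elif decode per step) by two staged passes: first it records the net-turn heading (t % 4) in effect before each character, then it filters out the turn characters and computes the final position in closed form from the counts of each heading among the forward steps.
import Mathlib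
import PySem

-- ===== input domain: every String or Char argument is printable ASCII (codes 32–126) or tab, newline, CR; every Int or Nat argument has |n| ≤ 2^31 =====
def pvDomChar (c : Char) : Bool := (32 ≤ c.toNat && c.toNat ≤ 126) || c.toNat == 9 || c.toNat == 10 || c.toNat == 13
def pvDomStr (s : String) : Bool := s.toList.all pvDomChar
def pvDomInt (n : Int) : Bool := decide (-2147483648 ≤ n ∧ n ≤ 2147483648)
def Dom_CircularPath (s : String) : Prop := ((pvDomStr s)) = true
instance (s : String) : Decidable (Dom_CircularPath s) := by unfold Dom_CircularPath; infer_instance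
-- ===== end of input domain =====

-- B replaces A's single simulation loop by two staged passes: record the net-turn
-- heading before each character, then combine the heading counts of the forward
-- steps in closed form (objective: alternative, not faster).

-- ===== PORT A =====
-- one loop step of A: state (x, y, d)
def pvStepA (st : Int × Int × Int) (move : Char) : Int × Int × Int :=
  let (x, y, d) := st
  if move = 'R' then (x, y, PySem.Int.mod (d + 1) 4)
  else if move = 'L' then (x, y, PySem.Int.mod (d + 3) 4)
  else
    if d = 0 then (x, y + 1, d)
    else if d = 2 then (x, y - 1, d)
    else if d = 1 then (x + 1, y, d)
    else if d = 3 then (x - 1, y, d)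
    else (x, y, d)

def CircularPath (s : String) : Int × Int :=
  let st := s.toList.foldl pvStepA (0, 0, (0 : Int))
  (st.1, st.2.1)

-- ===== PORT B =====
-- pass 1 of B: state (headings so far, net turn count t)
def pvPass1 (st : List Int × Int) (move : Char) : List Int × Int :=
  let hs := st.1 ++ [PySem.Int.mod st.2 4]
  let t := if move = 'R' then st.2 + 1 else if move = 'L' then st.2 - 1 else st.2
  (hs, t)

def CircularPath_alt (s : String) : Int × Int :=
  let p := s.toList.foldl pvPass1 ([], (0 : Int))
  let steps := ((s.toList.zip p.1).filter
      (fun q => !(q.1 == 'R') && !(q.1 == 'L'))).map Prod.snd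
  ((steps.count 1 : Int) - (steps.count 3 : Int),
   (steps.count 0 : Int) - (steps.count 2 : Int))

-- ===== PRECONDITION & SPEC =====
def Spec_CircularPath (s : String) (out : Int × Int) : Prop := out = CircularPath_alt s
instance (s : String) (out : Int × Int) : Decidable (Spec_CircularPath s out) := by unfold Spec_CircularPath; infer_instance

-- ===== CLAIM (what is proved, stated in full; the proofs are below) =====
def Claim_equal_CircularPath : Prop := ∀ (s : String), Dom_CircularPath s → Spec_CircularPath s (CircularPath s)

-- ===== LEMMAS AND PROOFS =====

theorem pvMod4 (t : Int) : PySem.Int.mod t 4 = t % 4 := by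
  simp [PySem.Int.mod, Int.fmod_eq_emod]

-- the heading trace B's first pass produces, starting from turn count t
def pvHs : List Char → Int → List Int
  | [], _ => []
  | c :: l, t =>
      t % 4 :: pvHs l (if c = 'R' then t + 1 else if c = 'L' then t - 1 else t)

-- the displacement contributed by l given a starting turn count t (proof-side reference)
def pvDisp : List Char → Int → Int × Int
  | [], _ => (0, 0)
  | c :: l, t =>
      if c = 'R' then pvDisp l (t + 1)
      else if c = 'L' then pvDisp l (t - 1)
      else
        let m := t % 4
        let r := pvDisp l t
        ((if m = 1 then r.1 + 1 else if m = 3 then r.1 - 1 else r.1),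
         (if m = 0 then r.2 + 1 else if m = 2 then r.2 - 1 else r.2))

theorem pvPass1_fst (l : List Char) : ∀ (acc : List Int) (t : Int),
    (l.foldl pvPass1 (acc, t)).1 = acc ++ pvHs l t := by
  induction l with
  | nil => intro acc t; simp [pvHs]
  | cons c l ih =>
    intro acc t
    simp only [List.foldl_cons, pvPass1, pvMod4, pvHs]
    rw [ih]
    simp

theorem pvAlt_eq_disp (l : List Char) : ∀ (t : Int),
    (((((l.zip (pvHs l t)).filter (fun q => !(q.1 == 'R') && !(q.1 == 'L'))).map Prod.snd).count 1 : Int)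
       - ((((l.zip (pvHs l t)).filter (fun q => !(q.1 == 'R') && !(q.1 == 'L'))).map Prod.snd).count 3 : Int),
     ((((l.zip (pvHs l t)).filter (fun q => !(q.1 == 'R') && !(q.1 == 'L'))).map Prod.snd).count 0 : Int)
       - ((((l.zip (pvHs l t)).filter (fun q => !(q.1 == 'R') && !(q.1 == 'L'))).map Prod.snd).count 2 : Int))
    = pvDisp l t := by
  induction l with
  | nil => intro t; simp [pvHs, pvDisp]
  | cons c l ih =>
    intro t
    by_cases hR : c = 'R'
    · simp [pvHs, pvDisp, hR, ih]
    · by_cases hL : c = 'L'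
      · simp [pvHs, pvDisp, hR, hL, ih]
      · have hm : t % 4 = 0 ∨ t % 4 = 1 ∨ t % 4 = 2 ∨ t % 4 = 3 := by omega
        simp only [pvHs, pvDisp, hR, hL, if_false, List.zip_cons_cons]
        rw [List.filter_cons_of_pos (by simp [hR, hL])]
        simp only [List.map_cons, List.count_cons]
        rcases hm with h | h | h | h <;>
          rw [h] <;> norm_num <;> rw [← ih t] <;> ring_nf <;> simp

theorem pvA_eq_disp (l : List Char) : ∀ (x y t : Int),
    (l.foldl pvStepA (x, y, t % 4)).1 = x + (pvDisp l t).1 ∧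
    (l.foldl pvStepA (x, y, t % 4)).2.1 = y + (pvDisp l t).2 := by
  induction l with
  | nil => intro x y t; simp [pvDisp]
  | cons c l ih =>
    intro x y t
    by_cases hR : c = 'R'
    · have h1 : PySem.Int.mod (t % 4 + 1) 4 = (t + 1) % 4 := by rw [pvMod4]; omega
      simp only [List.foldl_cons, pvStepA, hR, if_true, h1]
      simpa [pvDisp, hR] using ih x y (t + 1)
    · by_cases hL : c = 'L'
      · have h1 : PySem.Int.mod (t % 4 + 3) 4 = (t - 1) % 4 := by rw [pvMod4]; omega
        simp only [List.foldl_cons, pvStepA, hR, hL, if_false, if_true, h1]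
        simpa [pvDisp, hR, hL] using ih x y (t - 1)
      · have hm : t % 4 = 0 ∨ t % 4 = 1 ∨ t % 4 = 2 ∨ t % 4 = 3 := by omega
        simp only [List.foldl_cons, pvStepA, hR, hL, if_false]
        rcases hm with h | h | h | h
        · have ih' := ih x (y + 1) t; rw [h] at ih'
          rw [h]; norm_num
          simp only [pvDisp, hR, hL, if_false, h]; norm_num
          exact ⟨ih'.1, by rw [ih'.2]; ring⟩
        · have ih' := ih (x + 1) y t; rw [h] at ih'
          rw [h]; norm_num
          simp only [pvDisp, hR, hL, if_false, h]; norm_num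
          exact ⟨by rw [ih'.1]; ring, ih'.2⟩
        · have ih' := ih x (y - 1) t; rw [h] at ih'
          rw [h]; norm_num
          simp only [pvDisp, hR, hL, if_false, h]; norm_num
          exact ⟨ih'.1, by rw [ih'.2]; ring⟩
        · have ih' := ih (x - 1) y t; rw [h] at ih'
          rw [h]; norm_num
          simp only [pvDisp, hR, hL, if_false, h]; norm_num
          exact ⟨by rw [ih'.1]; ring, ih'.2⟩

-- ===== VERDICT (by name: the statement is the Claim_ definition above) =====
theorem CircularPath_spec : Claim_equal_CircularPath := by
  intro s _
  unfold Spec_CircularPath CircularPath CircularPath_alt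
  have hA := pvA_eq_disp s.toList 0 0 0
  have hB := pvAlt_eq_disp s.toList 0
  simp only [pvPass1_fst s.toList [] 0, List.nil_append]
  rw [hB]
  norm_num at hA
  exact Prod.ext hA.1 hA.2
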